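-- pv_equiv track=rewrite | github.com/panicPaul/splatkit | packages/marimo-config-gui/src/marimo_config_gui/_pydantic.py | _disambiguate_labels
-- ===== SOURCE A (Python) =====
-- def _disambiguate_labels(labels: list[str]) -> list[str]:
--     counts: dict[str, int] = {}
--     result: list[str] = []
--     for label in labels:
--         count = counts.get(label, 0) + 1
--         counts[label] = count
--         result.append(label if count == 1 else f"{label} ({count})")
--     return result
-- ===== SOURCE B (Python) =====
-- def _disambiguate_labels(labels: list[str]) -> list[str]:
--     totals: dict[str, int] = {}
--     for label in labels:
--         totals[label] = totals.get(label, 0) + 1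
--     out: list[str] = []
--     for label in reversed(labels):
--         r = totals[label]
--         totals[label] = r - 1
--         out.append(label if r == 1 else f"{label} ({r})")
--     out.reverse()
--     return out
-- ===== Notes on version B (the rewrite author's own statement) =====
-- stated objective: alternative
-- what changed: Replaces A's single forward pass that renders each label from a running count-so-far with a two-pass scheme: first total counts per label, then a back-to-front pass that reads each occurrence's rank by decrementing the totals and reverses the output.
import Mathlib
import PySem

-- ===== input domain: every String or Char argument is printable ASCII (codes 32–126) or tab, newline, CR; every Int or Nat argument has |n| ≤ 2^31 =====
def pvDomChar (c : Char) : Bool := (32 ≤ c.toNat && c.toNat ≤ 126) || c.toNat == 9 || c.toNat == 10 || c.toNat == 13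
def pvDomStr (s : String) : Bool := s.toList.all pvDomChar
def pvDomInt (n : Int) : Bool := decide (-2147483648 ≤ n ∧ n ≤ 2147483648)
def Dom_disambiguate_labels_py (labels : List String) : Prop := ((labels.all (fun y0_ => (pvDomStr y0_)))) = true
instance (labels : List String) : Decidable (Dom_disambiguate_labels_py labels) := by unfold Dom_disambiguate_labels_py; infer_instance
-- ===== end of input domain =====

-- B replaces A's single forward count-so-far pass by two passes: total counts first, then a
-- back-to-front pass that reads each occurrence's rank by decrementing the totals; objective: alternative.

-- f"{label} ({count})"  (shared f-string helper; built on List Char, kernel-transparent)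
def fmtLabel (label : String) (count : Int) : String :=
  String.ofList (label.toList ++ ' ' :: '(' :: (PySem.Int.toChars count ++ [')']))

-- ===== PORT A =====
def disambiguate_labels_py (labels : List String) : List String :=
  (labels.foldl
    (fun (st : PySem.Dict String Int × List String) label =>
      let count := st.1.getD label 0 + 1
      let counts := st.1.insert label count
      let result := st.2 ++ [if count = 1 then label else fmtLabel label count]
      (counts, result))
    (PySem.Dict.empty, [])).2

-- ===== PORT B =====
def disambiguate_labels_py_alt (labels : List String) : List String :=
  let totals := labels.foldl
    (fun (d : PySem.Dict String Int) label => d.insert label (d.getD label 0 + 1))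
    PySem.Dict.empty
  -- totals[label] read: exact as getD, since every label of reversed(labels) is a key of totals
  let st := labels.reverse.foldl
    (fun (st : PySem.Dict String Int × List String) label =>
      let r := st.1.getD label 0
      (st.1.insert label (r - 1),
       st.2 ++ [if r = 1 then label else fmtLabel label r]))
    (totals, [])
  st.2.reverse

-- ===== PRECONDITION & SPEC =====
def Spec_disambiguate_labels_py (labels : List String) (out : List String) : Prop := out = disambiguate_labels_py_alt labels
instance (labels : List String) (out : List String) : Decidable (Spec_disambiguate_labels_py labels out) := by unfold Spec_disambiguate_labels_py; infer_instance

-- ===== CLAIM (what is proved, stated in full; the proofs are below) =====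
def Claim_equal_disambiguate_labels_py : Prop := ∀ (labels : List String), Dom_disambiguate_labels_py labels → Spec_disambiguate_labels_py labels (disambiguate_labels_py labels)

-- ===== LEMMAS AND PROOFS =====

-- common middle form: explicit "seen prefix" recursion
def disRec (seen : List String) : List String → List String
  | [] => []
  | x :: ls =>
      (if x ∈ seen then fmtLabel x ((seen.count x : Int) + 1) else x)
        :: disRec (seen ++ [x]) ls

theorem foldA_eq_disRec (ls : List String) :
    ∀ (seen acc : List String),
      (ls.foldl
        (fun (st : PySem.Dict String Int × List String) label =>
          let count := st.1.getD label 0 + 1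
          let counts := st.1.insert label count
          let result := st.2 ++ [if count = 1 then label else fmtLabel label count]
          (counts, result))
        (seen.foldl (fun d x => d.insert x (d.getD x 0 + 1)) PySem.Dict.empty, acc)).2
      = acc ++ disRec seen ls := by
  induction ls with
  | nil => intro seen acc; simp [disRec]
  | cons x ls ih =>
    intro seen acc
    have hget : (seen.foldl (fun d x => d.insert x (d.getD x 0 + 1))
        (PySem.Dict.empty : PySem.Dict String Int)).getD x 0 = (seen.count x : Int) := by
      simpa using PySem.Dict.getD_foldl_insert_add_one (l := seen)
        (d := (PySem.Dict.empty : PySem.Dict String Int)) (v := x)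
    have hins : (seen.foldl (fun d x => d.insert x (d.getD x 0 + 1))
          (PySem.Dict.empty : PySem.Dict String Int)).insert x ((seen.count x : Int) + 1)
        = (seen ++ [x]).foldl (fun d x => d.insert x (d.getD x 0 + 1)) PySem.Dict.empty := by
      rw [List.foldl_append]
      simp [hget]
    simp only [List.foldl_cons, hget, hins]
    rw [ih (seen ++ [x]) (acc ++ [_])]
    simp only [disRec, List.append_assoc, List.singleton_append]
    by_cases hx : x ∈ seen
    · have : (seen.count x : Int) + 1 ≠ 1 := by
        have := List.count_pos_iff.mpr hx
        omega
      simp [hx, this]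
    · have : seen.count x = 0 := List.count_eq_zero.mpr hx
      simp [hx, this]

-- disRec appends the entry for the last element
theorem disRec_append_singleton (ls : List String) :
    ∀ (s : List String) (x : String),
      disRec s (ls ++ [x])
        = disRec s ls
          ++ [if x ∈ s ++ ls then fmtLabel x (((s ++ ls).count x : Int) + 1) else x] := by
  induction ls with
  | nil => intro s x; simp [disRec]
  | cons y ls ih =>
    intro s x
    simp only [List.cons_append, disRec, ih (s ++ [y]) x, List.append_assoc,
      List.nil_append]

-- B's reverse pass, run on any dict holding the counts of the unprocessed prefix
theorem foldB_eq_disRec (seen : List String) :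
    ∀ (d : PySem.Dict String Int) (acc : List String),
      (∀ v, d.getD v 0 = (seen.count v : Int)) →
      (seen.reverse.foldl
        (fun (st : PySem.Dict String Int × List String) label =>
          let r := st.1.getD label 0
          (st.1.insert label (r - 1),
           st.2 ++ [if r = 1 then label else fmtLabel label r]))
        (d, acc)).2
      = acc ++ (disRec [] seen).reverse := by
  induction seen using List.reverseRecOn with
  | nil => intro d acc _; simp [disRec]
  | append_singleton init x ih =>
    intro d acc hd
    have hr : d.getD x 0 = (init.count x : Int) + 1 := by
      rw [hd x]; simp [List.count_append]
    rw [List.reverse_append, List.reverse_singleton, List.singleton_append,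
      List.foldl_cons]
    simp only [hr]
    have hd' : ∀ v, (d.insert x ((init.count x : Int) + 1 - 1)).getD v 0
        = (init.count v : Int) := by
      intro v
      rw [PySem.Dict.getD_insert]
      by_cases hv : v = x
      · simp [hv]
      · simp [hv, hd v, List.count_append]
        simp [Ne.symm hv]
    rw [ih (d.insert x ((init.count x : Int) + 1 - 1)) _ hd']
    rw [disRec_append_singleton init [] x, List.nil_append, List.reverse_append]
    simp only [List.reverse_singleton, List.singleton_append, List.append_assoc]
    congr 2
    by_cases hx : x ∈ init
    · have : (init.count x : Int) + 1 ≠ 1 := by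
        have := List.count_pos_iff.mpr hx
        omega
      simp [hx, this]
    · have : init.count x = 0 := List.count_eq_zero.mpr hx
      simp [hx, this]

-- ===== VERDICT (by name: the statement is the Claim_ definition above) =====
theorem disambiguate_labels_py_spec : Claim_equal_disambiguate_labels_py := by
  intro labels _
  show disambiguate_labels_py labels = disambiguate_labels_py_alt labels
  have htot : ∀ v, (labels.foldl
      (fun (d : PySem.Dict String Int) label => d.insert label (d.getD label 0 + 1))
      PySem.Dict.empty).getD v 0 = (labels.count v : Int) := by
    intro v
    simpa using PySem.Dict.getD_foldl_insert_add_one (l := labels)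
      (d := (PySem.Dict.empty : PySem.Dict String Int)) (v := v)
  have hA : disambiguate_labels_py labels = disRec [] labels := by
    unfold disambiguate_labels_py
    rw [show ((PySem.Dict.empty : PySem.Dict String Int), ([] : List String))
          = (([] : List String).foldl (fun d x => d.insert x (d.getD x 0 + 1)) PySem.Dict.empty,
             ([] : List String)) from rfl,
        foldA_eq_disRec labels [] []]
    simp
  have hB : disambiguate_labels_py_alt labels = disRec [] labels := by
    show ((labels.reverse.foldl
        (fun (st : PySem.Dict String Int × List String) label =>
          let r := st.1.getD label 0
          (st.1.insert label (r - 1),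
           st.2 ++ [if r = 1 then label else fmtLabel label r]))
        (labels.foldl
          (fun (d : PySem.Dict String Int) label => d.insert label (d.getD label 0 + 1))
          PySem.Dict.empty, [])).2).reverse = disRec [] labels
    rw [foldB_eq_disRec labels _ [] htot]
    simp
  rw [hA, hB]
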